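-- pv_equiv track=rewrite | github.com/BERDataLakehouse/minio_manager_service | src/polaris/constants.py | dedup_groups_preferring_write
-- ===== SOURCE A (Python) =====
-- from collections.abc import Iterable
-- from typing import Tuple
--
-- def normalize_group_name_for_polaris(group_name: str) -> Tuple[str, bool]:
--     """Derive the base group name and read-only flag for Polaris operations.
--
--     Read-only groups use the suffix "ro" (e.g., "kbasero" → base "kbase", is_ro=True).
--
--     Returns:
--         (base_group_name, is_read_only_group)
--     """
--     if group_name.endswith("ro"):
--         return group_name[:-2], True
--     return group_name, False
--
-- def dedup_groups_preferring_write(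
--     user_groups: Iterable[str],
-- ) -> dict[str, bool]:
--     """Collapse a user's MinIO group memberships to one Polaris binding per tenant.
--
--     A user can belong to both the read-write (``teamA``) and read-only
--     (``teamAro``) variants of the same tenant. In Polaris we only need the
--     higher-privilege binding — granting both is wasteful and the writer role
--     is a strict superset of the reader role anyway.
--
--     Empty base names (e.g., a group literally called ``"ro"``) are dropped
--     defensively so we never call Polaris with an empty catalog name.
--
--     Used by both the live provisioning path
--     (:func:`polaris.orchestration.ensure_user_polaris_state`) and the bulk
--     backfill (``ensure-polaris-resources`` migration endpoint) so they apply
--     identical role-binding semantics.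
--
--     Returns:
--         Mapping from base group name to ``is_read_only`` flag.
--     """
--     deduped: dict[str, bool] = {}
--     for group_name in user_groups:
--         base, is_ro = normalize_group_name_for_polaris(group_name)
--         if not base:
--             continue
--         # Prefer write (is_ro=False) over read (is_ro=True) when both variants present.
--         if not is_ro or base not in deduped:
--             deduped[base] = is_ro
--     return deduped
-- ===== SOURCE B (Python) =====
-- def dedup_groups_preferring_write(user_groups):
--     # Group-then-reduce: collect every variant's is_ro flag per base name
--     # (first-appearance order), then a tenant is read-only exactly when
--     # all of its variants are read-only.
--     grouped = {}
--     for group_name in user_groups: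
--         if group_name.endswith("ro"):
--             base, is_ro = group_name[:-2], True
--         else:
--             base, is_ro = group_name, False
--         if base:
--             grouped.setdefault(base, []).append(is_ro)
--     return {base: all(flags) for base, flags in grouped.items()}
-- ===== Notes on version B (the rewrite author's own statement) =====
-- stated objective: alternative
-- what changed: Replaces A's incremental prefer-write dict update with a two-pass group-then-reduce: first pass groups each base name's is_ro flags into lists, second pass reduces each group with all(), since a tenant is read-only exactly when no write variant appears.
import Mathlib
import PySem

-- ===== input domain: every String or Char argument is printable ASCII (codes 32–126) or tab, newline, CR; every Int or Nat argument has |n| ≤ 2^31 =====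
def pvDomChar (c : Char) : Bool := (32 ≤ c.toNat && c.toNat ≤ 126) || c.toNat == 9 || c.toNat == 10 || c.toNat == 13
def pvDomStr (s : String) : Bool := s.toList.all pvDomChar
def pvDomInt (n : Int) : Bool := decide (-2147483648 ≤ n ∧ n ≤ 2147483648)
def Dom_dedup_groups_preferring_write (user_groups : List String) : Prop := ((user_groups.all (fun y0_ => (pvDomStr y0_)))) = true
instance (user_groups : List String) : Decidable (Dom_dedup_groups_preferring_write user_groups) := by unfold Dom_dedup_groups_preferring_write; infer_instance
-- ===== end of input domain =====

-- B replaces A's incremental prefer-write update by a group-then-reduce over per-base flag lists (alternative decomposition, same cost).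

-- ===== PORT A =====
def normalize_group_name_for_polaris (group_name : String) : String × Bool :=
  if PySem.Str.endswith group_name "ro" then
    (PySem.Str.slice group_name none (some (-2)), true)
  else
    (group_name, false)

def pvStepA (d : PySem.Dict String Bool) (group_name : String) : PySem.Dict String Bool :=
  let p := normalize_group_name_for_polaris group_name
  if p.1 = "" then d
  else if !p.2 || !(d.contains p.1) then d.insert p.1 p.2 else d

def dedup_groups_preferring_write (user_groups : List String) : List (String × Bool) :=
  (user_groups.foldl pvStepA PySem.Dict.empty).items

-- ===== PORT B =====
def pvStepB (d : PySem.Dict String (List Bool)) (group_name : String) : PySem.Dict String (List Bool) :=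
  let p := if PySem.Str.endswith group_name "ro" then
             (PySem.Str.slice group_name none (some (-2)), true)
           else (group_name, false)
  if p.1 = "" then d else d.modify p.1 [] (· ++ [p.2])

def dedup_groups_preferring_write_alt (user_groups : List String) : List (String × Bool) :=
  ((user_groups.foldl pvStepB PySem.Dict.empty).items).map (fun kv => (kv.1, kv.2.all id))

-- ===== PRECONDITION & SPEC =====
def Spec_dedup_groups_preferring_write (user_groups : List String) (out : List (String × Bool)) : Prop := out = dedup_groups_preferring_write_alt user_groups
instance (user_groups : List String) (out : List (String × Bool)) : Decidable (Spec_dedup_groups_preferring_write user_groups out) := by unfold Spec_dedup_groups_preferring_write; infer_instance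

-- ===== CLAIM (what is proved, stated in full; the proofs are below) =====
def Claim_equal_dedup_groups_preferring_write : Prop := ∀ (user_groups : List String), Dom_dedup_groups_preferring_write user_groups → Spec_dedup_groups_preferring_write user_groups (dedup_groups_preferring_write user_groups)

-- ===== LEMMAS AND PROOFS =====

-- the reduction applied elementwise to B's grouped items
def pvMapAll (l : List (String × List Bool)) : List (String × Bool) :=
  l.map (fun kv => (kv.1, kv.2.all id))

theorem pvKeys_eq (dA : PySem.Dict String Bool) (dB : PySem.Dict String (List Bool))
    (h : dA.items = pvMapAll dB.items) : dA.keys = dB.keys := by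
  show dA.items.map (·.1) = dB.items.map (·.1)
  simp [h, pvMapAll]

theorem pvContains_eq (dA : PySem.Dict String Bool) (dB : PySem.Dict String (List Bool))
    (h : dA.items = pvMapAll dB.items) (k : String) : dA.contains k = dB.contains k := by
  rw [PySem.Dict.contains_eq_decide_mem_keys, PySem.Dict.contains_eq_decide_mem_keys,
    pvKeys_eq dA dB h]

theorem pvStep_inv (dA : PySem.Dict String Bool) (dB : PySem.Dict String (List Bool))
    (g : String) (hnd : dB.keys.Nodup) (h : dA.items = pvMapAll dB.items) :
    (pvStepA dA g).items = pvMapAll (pvStepB dB g).items := by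
  unfold pvStepA pvStepB normalize_group_name_for_polaris
  set p := if PySem.Str.endswith g "ro" then
             (PySem.Str.slice g none (some (-2)), true)
           else (g, false) with hp
  clear_value p
  obtain ⟨b, r⟩ := p
  by_cases hb : b = ""
  · simp [hb, h]
  · simp only [hb, if_false]
    by_cases hc : dB.contains b = true
    · -- base already grouped
      have hcA : dA.contains b = true := by rw [pvContains_eq dA dB h]; exact hc
      have hmod : dB.modify b [] (· ++ [r]) = dB.insert b (dB.getD b [] ++ [r]) := rfl
      cases r with
      | true =>
        -- A keeps its entry; B appends True, all() unchanged
        rw [if_neg (by simp [hcA])]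
        rw [hmod, pvMapAll, PySem.Dict.items_insert_of_contains _ _ hc, List.map_map, h, pvMapAll]
        apply List.map_congr_left
        intro q hq
        by_cases hqb : q.1 = b
        · have hval : dB.getD b [] = q.2 := by
            have : (b, q.2) ∈ dB.items := by rw [← hqb]; exact hq
            exact PySem.Dict.getD_of_mem_items dB this hnd []
          simp [Function.comp, hqb, hval]
        · simp [Function.comp, hqb]
      | false =>
        -- A overwrites with False in place; B appends False, all() becomes False
        rw [if_pos (by simp)]
        rw [hmod, pvMapAll, PySem.Dict.items_insert_of_contains _ _ hc, List.map_map,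
          PySem.Dict.items_insert_of_contains _ _ hcA, h, pvMapAll, List.map_map]
        apply List.map_congr_left
        intro q hq
        by_cases hqb : q.1 = b <;> simp [Function.comp, hqb]
    · -- fresh base: both append a new entry
      have hc' : dB.contains b = false := by simpa using hc
      have hcA : dA.contains b = false := by rw [pvContains_eq dA dB h]; exact hc'
      have hA : (!r || !dA.contains b) = true := by simp [hcA]
      have hmod : dB.modify b [] (· ++ [r]) = dB.insert b (dB.getD b [] ++ [r]) := rfl
      rw [if_pos hA, hmod, PySem.Dict.getD_of_not_contains dB [] hc',
        PySem.Dict.items_insert_of_not_contains dA r hcA,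
        pvMapAll, PySem.Dict.items_insert_of_not_contains dB _ hc']
      simp [h, pvMapAll]

theorem pvStepB_nodup (dB : PySem.Dict String (List Bool)) (g : String)
    (hnd : dB.keys.Nodup) : (pvStepB dB g).keys.Nodup := by
  unfold pvStepB
  split <;>
  · dsimp only
    split
    · exact hnd
    · exact PySem.Dict.nodup_keys_insert _ _ _ hnd

theorem pvLoop_inv (l : List String) (dA : PySem.Dict String Bool)
    (dB : PySem.Dict String (List Bool)) (hnd : dB.keys.Nodup)
    (h : dA.items = pvMapAll dB.items) :
    (l.foldl pvStepA dA).items = pvMapAll (l.foldl pvStepB dB).items := by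
  induction l generalizing dA dB with
  | nil => simpa using h
  | cons g rest ih =>
    simp only [List.foldl_cons]
    exact ih _ _ (pvStepB_nodup dB g hnd) (pvStep_inv dA dB g hnd h)

-- ===== VERDICT (by name: the statement is the Claim_ definition above) =====
theorem dedup_groups_preferring_write_spec : Claim_equal_dedup_groups_preferring_write := by
  intro user_groups _
  show dedup_groups_preferring_write user_groups = dedup_groups_preferring_write_alt user_groups
  exact pvLoop_inv user_groups PySem.Dict.empty PySem.Dict.empty PySem.Dict.nodup_keys_empty rfl
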